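-- pv_equiv track=rewrite | github.com/MClay0/aoc_2024 | dec_10/disk.py | createGapDict
-- ===== SOURCE A (Python) =====
-- def createGapDict(memoryBlock):
--     gaps = {}
--     i = 0
--     while i < len(memoryBlock):
--         if memoryBlock[i] == ".":
--             j = i
--             while memoryBlock[j] == ".":
--                 j+=1
--                 if j >= len(memoryBlock):
--                     break
--             if j-i in gaps:
--                 gaps[j-i].append(i)
--             else:
--                 gaps[j-i] = [i]
--             i = j
--         else:
--             i+=1
--     return gaps
-- ===== SOURCE B (Python) =====
-- def createGapDict(memoryBlock):
--     # Staged boundary-detection: collect dot indices, pick run starts/ends by a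
--     # neighbor test, zip them into (start, end) pairs and bucket by run length.
--     n = len(memoryBlock)
--     dots = [k for k, ch in enumerate(memoryBlock) if ch == "."]
--     starts = [d for d in dots if d == 0 or memoryBlock[d - 1] != "."]
--     ends = [d for d in dots if d + 1 == n or memoryBlock[d + 1] != "."]
--     gaps = {}
--     for s, e in zip(starts, ends):
--         gaps.setdefault(e - s + 1, []).append(s)
--     return gaps
-- ===== Notes on version B (the rewrite author's own statement) =====
-- stated objective: alternative
-- what changed: Replaces A's outer/inner two-pointer while scan with staged passes: collect all '.' indices, select run starts and run ends by a neighbor test, zip them into (start,end) pairs and bucket each pair by its length e-s+1.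
import Mathlib
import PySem

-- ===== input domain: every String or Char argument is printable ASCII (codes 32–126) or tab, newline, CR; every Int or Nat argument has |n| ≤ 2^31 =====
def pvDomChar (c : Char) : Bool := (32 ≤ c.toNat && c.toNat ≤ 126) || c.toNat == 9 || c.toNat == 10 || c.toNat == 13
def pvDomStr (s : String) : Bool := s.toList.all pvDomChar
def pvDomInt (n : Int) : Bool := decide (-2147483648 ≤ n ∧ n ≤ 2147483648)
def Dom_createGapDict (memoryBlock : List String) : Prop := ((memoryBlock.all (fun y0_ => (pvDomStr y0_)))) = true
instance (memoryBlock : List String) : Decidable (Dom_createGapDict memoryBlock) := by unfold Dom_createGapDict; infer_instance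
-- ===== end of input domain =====

-- B replaces A's outer/inner two-pointer while scan with staged passes: collect the '.' indices,
-- pick run starts/ends by a neighbor test, zip them and bucket each pair by its length
-- (objective: alternative). Return values only; neither program mutates its argument.

-- ===== PORT A =====
-- inner `while memoryBlock[j] == ".": j += 1; if j >= len: break` (entered at j = i);
-- List.getD is exact here: every access is at an index already checked to be < length.
def jLoop (memoryBlock : List String) (j : Nat) : Nat :=
  if _h : j + 1 ≥ memoryBlock.length then j + 1
  else if memoryBlock.getD (j + 1) "" == "." then jLoop memoryBlock (j + 1)
  else j + 1
termination_by memoryBlock.length - j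

theorem lt_jLoop (memoryBlock : List String) (j : Nat) : j < jLoop memoryBlock j := by
  unfold jLoop
  split
  · omega
  · split
    · have := lt_jLoop memoryBlock (j + 1); omega
    · omega
termination_by memoryBlock.length - j

-- `if j-i in gaps: gaps[j-i].append(i) else: gaps[j-i] = [i]` (A's dict-update idiom)
def pushIdx (g : PySem.Dict Int (List Int)) (key : Int) (v : Int) : PySem.Dict Int (List Int) :=
  if g.contains key then g.insert key (g.getD key [] ++ [v]) else g.insert key [v]

-- outer `while i < len(memoryBlock)` loop of A
def aLoop (memoryBlock : List String) (i : Nat) (gaps : PySem.Dict Int (List Int)) :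
    PySem.Dict Int (List Int) :=
  if h : i < memoryBlock.length then
    if memoryBlock.getD i "" == "." then
      aLoop memoryBlock (jLoop memoryBlock i)
        (pushIdx gaps ((jLoop memoryBlock i : Int) - (i : Int)) (i : Int))
    else aLoop memoryBlock (i + 1) gaps
  else gaps
termination_by memoryBlock.length - i
decreasing_by
  · have := lt_jLoop memoryBlock i; omega
  · omega

def createGapDict (memoryBlock : List String) : List (Int × List Int) :=
  (aLoop memoryBlock 0 PySem.Dict.empty).items

-- ===== PORT B =====
-- Source B line by line: n = len(..); dots = [k for k,ch in enumerate(..) if ch == "."];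
-- starts/ends = boundary filters over dots (indexing is guarded, so pyGetD is exact);
-- then `gaps.setdefault(e-s+1, []).append(s)` = Dict.modify (e-s+1) [] (· ++ [s]).
def createGapDict_alt (memoryBlock : List String) : List (Int × List Int) :=
  let n : Int := memoryBlock.length
  let dots : List Int :=
    ((PySem.List.enumerate memoryBlock).filter (fun p => p.2 == ".")).map (fun p => p.1)
  let starts := dots.filter (fun d => d == 0 || !(PySem.List.pyGetD memoryBlock (d - 1) "" == "."))
  let ends := dots.filter (fun d => d + 1 == n || !(PySem.List.pyGetD memoryBlock (d + 1) "" == "."))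
  ((starts.zip ends).foldl
      (fun g p => g.modify (p.2 - p.1 + 1) [] (fun l => l ++ [p.1])) PySem.Dict.empty).items

-- ===== PRECONDITION & SPEC =====
def Spec_createGapDict (memoryBlock : List String) (out : List (Int × List Int)) : Prop := out = createGapDict_alt memoryBlock
instance (memoryBlock : List String) (out : List (Int × List Int)) : Decidable (Spec_createGapDict memoryBlock out) := by unfold Spec_createGapDict; infer_instance

-- ===== CLAIM (what is proved, stated in full; the proofs are below) =====
def Claim_equal_createGapDict : Prop := ∀ (memoryBlock : List String), Dom_createGapDict memoryBlock → Spec_createGapDict memoryBlock (createGapDict memoryBlock)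

-- ===== LEMMAS AND PROOFS =====

-- the maximal '.' runs of a suffix, as (start, length) pairs, in order
def runsAux : List String → Nat → List (Nat × Nat)
  | [], _ => []
  | x :: xs, i =>
    if x == "." then
      (i, (xs.takeWhile (fun y => y == ".")).length + 1) ::
        runsAux (xs.dropWhile (fun y => y == "."))
          (i + ((xs.takeWhile (fun y => y == ".")).length + 1))
    else runsAux xs (i + 1)
termination_by l => l.length
decreasing_by
  · have := List.length_dropWhile_le (fun y => y == ".") xs; simp; omega
  · simp

-- the inner while-loop of A computes: index just past the maximal '.' run following i
theorem jLoop_eq (memoryBlock : List String) (xs : List String) (i : Nat)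
    (hd : memoryBlock.drop (i + 1) = xs) :
    jLoop memoryBlock i = i + 1 + (xs.takeWhile (fun y => y == ".")).length := by
  unfold jLoop
  split
  · have : xs = [] := by
      rw [← hd]; exact List.drop_eq_nil_of_le (by omega)
    simp [this]
  · rename_i hlen
    have hlt : i + 1 < memoryBlock.length := by omega
    obtain ⟨y, ys, hxs⟩ : ∃ y ys, xs = y :: ys := by
      rcases xs with _ | ⟨y, ys⟩
      · exfalso
        have := congrArg List.length hd
        simp at this; omega
      · exact ⟨y, ys, rfl⟩
    have hy : memoryBlock.getD (i + 1) "" = y := by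
      have h0 : memoryBlock[i+1]? = some y := by
        have h := (List.getElem?_drop : (memoryBlock.drop (i+1))[0]? = memoryBlock[(i+1)+0]?)
        simp [hd, hxs] at h
        simpa using h.symm
      simp [List.getD, h0]
    have hys : memoryBlock.drop (i + 1 + 1) = ys := by
      have : memoryBlock.drop (i + 1 + 1) = (memoryBlock.drop (i + 1)).drop 1 := by
        rw [← List.drop_drop]
      rw [this, hd, hxs]; rfl
    by_cases hdot : y = "."
    · subst hdot
      rw [hy]
      simp only [beq_self_eq_true, if_true]
      rw [jLoop_eq memoryBlock ys (i + 1) hys]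
      simp only [hxs, List.takeWhile_cons, beq_self_eq_true, if_true, List.length_cons]
      omega
    · rw [hy]
      have : (y == ".") = false := by simpa using hdot
      simp [this, hxs]
termination_by memoryBlock.length - i
decreasing_by omega

-- an element of the suffix memoryBlock.drop i, read through getD
theorem getD_of_drop (mb l : List String) (i m : Nat) (h : mb.drop i = l) :
    mb.getD (i + m) "" = l.getD m "" := by
  have h0 : (mb.drop i)[m]? = mb[i + m]? := List.getElem?_drop
  rw [h] at h0
  rw [List.getD_eq_getElem?_getD, List.getD_eq_getElem?_getD, ← h0]

-- dropping the takeWhile prefix is dropWhile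
theorem drop_length_takeWhile {p : String → Bool} (xs : List String) :
    xs.drop (xs.takeWhile p).length = xs.dropWhile p := by
  induction xs with
  | nil => rfl
  | cons x xs ih =>
    by_cases hx : p x <;> simp [hx, ih]

-- A's outer loop folds pushIdx over the runs of the remaining suffix
theorem aLoop_eq_runs_aux (n : Nat) : ∀ (memoryBlock l : List String) (i : Nat)
    (g : PySem.Dict Int (List Int)), l.length ≤ n → memoryBlock.drop i = l →
    aLoop memoryBlock i g =
      (runsAux l i).foldl (fun g r => pushIdx g (r.2 : Int) (r.1 : Int)) g := by
  induction n with
  | zero =>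
    intro mb l i g hn hd
    have hl : l = [] := List.length_eq_zero_iff.mp (by omega)
    subst hl
    have hge : mb.length ≤ i := by
      by_contra hlt
      have := congrArg List.length hd
      simp at this; omega
    rw [aLoop]
    simp [runsAux, dif_neg (by omega : ¬ i < mb.length)]
  | succ n ih =>
    intro mb l i g hn hd
    rcases l with _ | ⟨x, xs⟩
    · have hge : mb.length ≤ i := by
        by_contra hlt
        have := congrArg List.length hd
        simp at this; omega
      rw [aLoop]
      simp [runsAux, dif_neg (by omega : ¬ i < mb.length)]
    · have hlen : mb.length = i + (xs.length + 1) := by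
        have := congrArg List.length hd
        simp at this; omega
      have hlt : i < mb.length := by omega
      have hx : mb.getD i "" = x := by
        have := getD_of_drop mb (x :: xs) i 0 hd
        simpa using this
      have hxs : mb.drop (i + 1) = xs := by
        have : mb.drop (i + 1) = (mb.drop i).drop 1 := by rw [← List.drop_drop]
        rw [this, hd]; rfl
      by_cases hdot : x = "."
      · subst hdot
        have hj : jLoop mb i = i + 1 + (xs.takeWhile (fun y => y == ".")).length :=
          jLoop_eq mb xs i hxs
        have hdropj : mb.drop (i + 1 + (xs.takeWhile (fun y => y == ".")).length) =
            xs.dropWhile (fun y => y == ".") := by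
          have h1 : mb.drop (i + 1 + (xs.takeWhile (fun y => y == ".")).length) =
              (mb.drop (i + 1)).drop (xs.takeWhile (fun y => y == ".")).length := by
            rw [← List.drop_drop]
          rw [h1, hxs, drop_length_takeWhile]
        rw [aLoop]
        simp only [dif_pos hlt, hx, beq_self_eq_true, if_true, hj]
        have hruns : runsAux ("." :: xs) i =
            (i, (xs.takeWhile (fun y => y == ".")).length + 1) ::
              runsAux (xs.dropWhile (fun y => y == "."))
                (i + ((xs.takeWhile (fun y => y == ".")).length + 1)) := by
          rw [runsAux]; simp
        rw [hruns, List.foldl_cons]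
        have hrlen : (xs.dropWhile (fun y => y == ".")).length ≤ n := by
          have := List.length_dropWhile_le (fun y => y == ".") xs
          simp at hn; omega
        have hidx : i + ((xs.takeWhile (fun y => y == ".")).length + 1) =
            i + 1 + (xs.takeWhile (fun y => y == ".")).length := by omega
        rw [hidx] at *
        rw [ih mb (xs.dropWhile (fun y => y == ".")) (i + 1 + (xs.takeWhile (fun y => y == ".")).length)
          _ hrlen hdropj]
        have hkey : ((i + 1 + (xs.takeWhile (fun y => y == ".")).length : Nat) : Int) - (i : Int) =
            (((xs.takeWhile (fun y => y == ".")).length + 1 : Nat) : Int) := by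
          push_cast; ring
        rw [hkey]
      · have hx' : (x == ".") = false := by simpa using hdot
        rw [aLoop]
        simp only [dif_pos hlt, hx, hx']
        have hruns : runsAux (x :: xs) i = runsAux xs (i + 1) := by
          rw [runsAux]; simp [hx']
        rw [hruns]
        exact ih mb xs (i + 1) g (by simp at hn; omega) hxs

-- B's staged filters produce exactly the run starts and run ends
theorem filters_eq_runs (memoryBlock : List String) : ∀ (n : Nat) (l : List String) (i : Nat),
    l.length ≤ n → memoryBlock.drop i = l →
    ((memoryBlock.getD i "" = ".") → (i = 0 ∨ memoryBlock.getD (i-1) "" ≠ ".")) →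
    (((PySem.List.enumerate l (i : Int)).filter (fun p => p.2 == ".")).map (fun p => p.1)).filter
        (fun d => d == 0 || !(PySem.List.pyGetD memoryBlock (d - 1) "" == ".")) =
      (runsAux l i).map (fun r => (r.1 : Int)) ∧
    (((PySem.List.enumerate l (i : Int)).filter (fun p => p.2 == ".")).map (fun p => p.1)).filter
        (fun d => d + 1 == (memoryBlock.length : Int) ||
          !(PySem.List.pyGetD memoryBlock (d + 1) "" == ".")) =
      (runsAux l i).map (fun r => ((r.1 : Int) + (r.2 : Int) - 1)) := by
  intro n
  induction n with
  | zero =>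
    intro l i hn _ _
    have hl : l = [] := List.length_eq_zero_iff.mp (by omega)
    subst hl
    simp [runsAux, PySem.List.enumerate_nil]
  | succ n ih =>
    intro l i hn hd hinv
    rcases l with _ | ⟨x, xs⟩
    · simp [runsAux, PySem.List.enumerate_nil]
    · have hlen : memoryBlock.length = i + (xs.length + 1) := by
        have := congrArg List.length hd
        simp at this; omega
      have hx : memoryBlock.getD i "" = x := by
        simpa using getD_of_drop memoryBlock (x :: xs) i 0 hd
      have hxs : memoryBlock.drop (i + 1) = xs := by
        have : memoryBlock.drop (i + 1) = (memoryBlock.drop i).drop 1 := by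
          rw [← List.drop_drop]
        rw [this, hd]; rfl
      by_cases hdot : x = "."
      · subst hdot
        -- the run block "." :: t and its remainder w
        have htw : xs.takeWhile (fun y => y == ".") ++ xs.dropWhile (fun y => y == ".") = xs :=
          List.takeWhile_append_dropWhile
        set t := xs.takeWhile (fun y => y == ".") with ht
        set w := xs.dropWhile (fun y => y == ".") with hw
        have htdots : ∀ y ∈ t, y = "." := by
          intro y hy
          exact eq_of_beq (List.mem_takeWhile_imp (p := fun y => y == ".") (ht ▸ hy))
        have hLle : t.length + 1 ≤ xs.length + 1 := by
          have := congrArg List.length htw; simp at this; omega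
        -- every position of the run is a dot
        have hdotAt : ∀ m, m ≤ t.length → memoryBlock.getD (i + m) "" = "." := by
          intro m hm
          rw [getD_of_drop memoryBlock ("." :: xs) i m hd]
          rcases m with _ | m'
          · rfl
          · show xs.getD m' "" = "."
            rw [← htw, List.getD_append _ _ _ _ (by omega),
              List.getD_eq_getElem _ _ (by omega)]
            exact htdots _ (List.getElem_mem _)
        -- the element just past the run, if any, is not a dot
        have hafter : (w = [] ∧ memoryBlock.length = i + (t.length + 1)) ∨
            (w ≠ [] ∧ memoryBlock.getD (i + (t.length + 1)) "" ≠ ".") := by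
          rcases hww : w with _ | ⟨y, ys⟩
          · left
            refine ⟨rfl, ?_⟩
            have := congrArg List.length htw; simp [hww] at this; omega
          · right
            refine ⟨by simp, ?_⟩
            have hy : (y == ".") = false := by
              have := List.head?_dropWhile_not (fun y => y == ".") xs
              rw [← hw, hww] at this; simpa using this
            have hget : memoryBlock.getD (i + (t.length + 1)) "" = y := by
              rw [getD_of_drop memoryBlock ("." :: xs) i (t.length + 1) hd]
              show xs.getD t.length "" = y
              rw [← htw, List.getD_append_right _ _ _ _ (by omega), hww]
              simp
            rw [hget]; simpa using hy
        have hruns : runsAux ("." :: xs) i =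
            (i, t.length + 1) :: runsAux w (i + (t.length + 1)) := by
          rw [runsAux]; simp [← ht, ← hw]
        have hwdrop : memoryBlock.drop (i + (t.length + 1)) = w := by
          have h1 : memoryBlock.drop (i + (t.length + 1)) =
              (memoryBlock.drop (i + 1)).drop t.length := by
            rw [List.drop_drop]; congr 1; omega
          rw [h1, hxs, ht, hw, drop_length_takeWhile]
        have hwlen : w.length ≤ n := by
          have h1 := List.length_dropWhile_le (fun y => y == ".") xs
          have h2 : ("." :: xs).length = xs.length + 1 := by simp
          rw [hw]; omega
        have hinvw : (memoryBlock.getD (i + (t.length + 1)) "" = ".") →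
            ((i + (t.length + 1)) = 0 ∨ memoryBlock.getD ((i + (t.length + 1)) - 1) "" ≠ ".") := by
          intro hdd
          exfalso
          rcases hafter with ⟨_, hL⟩ | ⟨_, hne⟩
          · rw [List.getD_eq_default _ _ (by omega)] at hdd
            exact absurd hdd (by decide)
          · exact hne hdd
        obtain ⟨ihs, ihe⟩ := ih w (i + (t.length + 1)) hwlen hwdrop hinvw
        -- split the enumeration at the end of the run
        have hsplit : ("." :: xs) = ("." :: t) ++ w := by simp [htw]
        have hdots : ((PySem.List.enumerate ("." :: xs) (i : Int)).filter
              (fun p => p.2 == ".")).map (fun p => p.1) =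
            PySem.List.pyRange (i : Int) ((i : Int) + ((t.length : Int) + 1)) 1 ++
              ((PySem.List.enumerate w ((i + (t.length + 1) : Nat) : Int)).filter
                (fun p => p.2 == ".")).map (fun p => p.1) := by
          conv_lhs => rw [hsplit]
          rw [PySem.List.enumerate_append, List.filter_append, List.map_append]
          have hall : (PySem.List.enumerate ("." :: t) (i : Int)).filter
              (fun p => p.2 == ".") = PySem.List.enumerate ("." :: t) (i : Int) := by
            apply List.filter_eq_self.mpr
            intro p hp
            have hp2 : p.2 ∈ ("." :: t) := by
              have hmap := PySem.List.map_snd_enumerate ("." :: t) (i : Int)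
              exact hmap ▸ List.mem_map_of_mem hp
            rcases List.mem_cons.mp hp2 with h | h
            · simp [h]
            · simp [htdots _ h]
          rw [hall, PySem.List.map_fst_enumerate]
          have hc1 : (i : Int) + (("." :: t).length : Int) = (i : Int) + ((t.length : Int) + 1) := by
            simp only [List.length_cons]; push_cast; ring
          have hc2 : (i : Int) + (("." :: t).length : Int) = ((i + (t.length + 1) : Nat) : Int) := by
            simp only [List.length_cons]; push_cast; ring
          rw [hc2,
            show (i : Int) + ((t.length : Int) + 1) = ((i + (t.length + 1) : Nat) : Int) by
              push_cast; ring]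
        -- the start filter keeps exactly the head of the run
        have hPstart_i : ((i : Int) == 0 ||
            !(PySem.List.pyGetD memoryBlock ((i : Int) - 1) "" == ".")) = true := by
          by_cases hi0 : i = 0
          · simp [hi0]
          · have hne : memoryBlock.getD (i - 1) "" ≠ "." := by
              rcases hinv hx with h0 | h; · omega
              · exact h
            have hii : (i : Int) - 1 = ((i - 1 : Nat) : Int) := by omega
            rw [hii, PySem.List.pyGetD_natCast]
            simpa using Or.inr hne
        have hstart_block : (PySem.List.pyRange (i : Int) ((i : Int) + ((t.length : Int) + 1)) 1).filter
              (fun d => d == 0 || !(PySem.List.pyGetD memoryBlock (d - 1) "" == ".")) = [(i : Int)] := by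
          rw [PySem.List.pyRange_one_cons (by omega), List.filter_cons]
          rw [if_pos hPstart_i]
          rw [List.filter_eq_nil_iff.mpr ?_]
          intro d hdm
          have hb := (PySem.List.mem_pyRange_one).mp hdm
          have h1 : d - 1 = ((i + (d - i - 1).toNat : Nat) : Int) := by omega
          have h2 : (d - i - 1).toNat ≤ t.length := by omega
          rw [h1, PySem.List.pyGetD_natCast, hdotAt _ h2]
          simp
          omega
        -- the end filter keeps exactly the last index of the run
        have hPend_last : (((i : Int) + (t.length : Int)) + 1 == (memoryBlock.length : Int) ||
            !(PySem.List.pyGetD memoryBlock (((i : Int) + (t.length : Int)) + 1) "" == ".")) = true := by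
          rcases hafter with ⟨_, hL⟩ | ⟨_, hne⟩
          · have : ((i : Int) + (t.length : Int)) + 1 = (memoryBlock.length : Int) := by
              rw [hL]; push_cast; ring
            simp [this]
          · have hc : ((i : Int) + (t.length : Int)) + 1 = ((i + (t.length + 1) : Nat) : Int) := by
              push_cast; ring
            rw [hc, PySem.List.pyGetD_natCast]
            simpa using Or.inr hne
        have hend_block : (PySem.List.pyRange (i : Int) ((i : Int) + ((t.length : Int) + 1)) 1).filter
              (fun d => d + 1 == (memoryBlock.length : Int) ||
                !(PySem.List.pyGetD memoryBlock (d + 1) "" == ".")) = [(i : Int) + (t.length : Int)] := by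
          have hsplitr : PySem.List.pyRange (i : Int) ((i : Int) + ((t.length : Int) + 1)) 1 =
              PySem.List.pyRange (i : Int) ((i : Int) + (t.length : Int)) 1 ++
                [(i : Int) + (t.length : Int)] := by
            rw [show (i : Int) + ((t.length : Int) + 1) = ((i : Int) + (t.length : Int)) + 1 by ring]
            exact PySem.List.pyRange_one_succ_right (by omega)
          rw [hsplitr, List.filter_append]
          rw [List.filter_eq_nil_iff.mpr ?_, List.filter_cons, if_pos hPend_last]
          · rfl
          intro d hdm
          have hb := (PySem.List.mem_pyRange_one).mp hdm
          have h1 : d + 1 = ((i + (d + 1 - i).toNat : Nat) : Int) := by omega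
          have h2 : (d + 1 - i).toNat ≤ t.length := by omega
          rw [h1, PySem.List.pyGetD_natCast, hdotAt _ h2]
          simp
          omega
        refine ⟨?_, ?_⟩
        · rw [hdots, List.filter_append, hstart_block, ihs, hruns, List.map_cons]
          rfl
        · rw [hdots, List.filter_append, hend_block, ihe, hruns, List.map_cons]
          show _ ++ _ = _ :: _
          rw [List.singleton_append]
          congr 1
          show (i : Int) + (t.length : Int) = ((i : Nat) : Int) + ((t.length + 1 : Nat) : Int) - 1
          push_cast; ring
      · have hx' : (x == ".") = false := by simpa using hdot
        have hruns : runsAux (x :: xs) i = runsAux xs (i + 1) := by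
          rw [runsAux]; simp [hx']
        have hinv' : (memoryBlock.getD (i+1) "" = ".") →
            ((i+1) = 0 ∨ memoryBlock.getD ((i+1)-1) "" ≠ ".") := by
          intro _
          right
          rw [Nat.add_sub_cancel, hx]
          exact hdot
        have hcast : (i : Int) + 1 = ((i + 1 : Nat) : Int) := by push_cast; ring
        have := ih xs (i + 1) (by simp at hn; omega) hxs hinv'
        rw [hruns]
        simp only [PySem.List.enumerate_cons, List.filter_cons, hx']
        rw [hcast]
        exact this

-- ===== VERDICT (by name: the statement is the Claim_ definition above) =====
theorem createGapDict_spec : Claim_equal_createGapDict := by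
  intro memoryBlock _
  unfold Spec_createGapDict createGapDict createGapDict_alt
  have hA := aLoop_eq_runs_aux memoryBlock.length memoryBlock memoryBlock 0 PySem.Dict.empty
    le_rfl (by simp)
  have hB := filters_eq_runs memoryBlock memoryBlock.length memoryBlock 0 le_rfl (by simp)
    (fun _ => Or.inl rfl)
  simp only [Nat.cast_zero] at hB
  dsimp only
  rw [hA, hB.1, hB.2, List.zip_map', List.foldl_map]
  congr 1
  apply PySem.List.foldl_congr_mem
  intro g r _
  symm
  show g.modify ((r.1 : Int) + (r.2 : Int) - 1 - (r.1 : Int) + 1) [] (fun l => l ++ [(r.1 : Int)]) =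
    pushIdx g (r.2 : Int) (r.1 : Int)
  have hk : (r.1 : Int) + (r.2 : Int) - 1 - (r.1 : Int) + 1 = (r.2 : Int) := by ring
  rw [hk]
  show g.insert (r.2 : Int) (g.getD (r.2 : Int) [] ++ [(r.1 : Int)]) = _
  unfold pushIdx
  by_cases hc : g.contains (r.2 : Int)
  · simp [hc]
  · simp only [Bool.not_eq_true] at hc
    rw [PySem.Dict.getD_of_not_contains (h := hc)]
    simp [hc]
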